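-- pv_equiv track=rewrite | github.com/Kawser-nerd/CLCDSA | Source Codes/AtCoder/abc025/A/4926675.py | string25
-- ===== SOURCE A (Python) =====
-- def string25(S: str, N: int) -> str:
--     sortedS = sorted(S)
--     count = 1
--     for c1 in sortedS:
--         for c2 in sortedS:
--             if count == N:
--                 return c1 + c2
--             count += 1
--     return "hoge"
-- ===== SOURCE B (Python) =====
-- def string25(S: str, N: int) -> str:
--     s = sorted(S)
--     L = len(s)
--     k = N - 1
--     if 0 <= k < L * L:
--         return s[k // L] + s[k % L]
--     return "hoge"
-- ===== Notes on version B (the rewrite author's own statement) =====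
-- stated objective: simpler
-- what changed: Replaces the nested scan over the sorted characters (counting up to N) with a direct index computation (N-1)//L and (N-1)%L into the sorted list.
import Mathlib
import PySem

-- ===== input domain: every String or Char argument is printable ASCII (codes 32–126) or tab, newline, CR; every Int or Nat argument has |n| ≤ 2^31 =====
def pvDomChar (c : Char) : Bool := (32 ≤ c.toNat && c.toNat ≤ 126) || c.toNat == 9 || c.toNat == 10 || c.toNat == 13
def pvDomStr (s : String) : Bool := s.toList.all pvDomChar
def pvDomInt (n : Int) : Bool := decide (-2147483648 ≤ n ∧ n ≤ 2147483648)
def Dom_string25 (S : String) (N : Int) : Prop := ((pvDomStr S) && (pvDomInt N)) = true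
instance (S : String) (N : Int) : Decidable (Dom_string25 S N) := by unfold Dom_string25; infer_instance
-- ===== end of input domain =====

-- B replaces A's nested counting scan over the sorted characters by a direct index computation
-- (N-1)//L and (N-1)%L into the sorted list (simpler).

-- ===== PORT A =====
-- inner 'for c2 in sortedS' loop: returns (early-return value, final count)
def string25Inner (c1 : Char) (l : List Char) (N : Int) (count : Int) : Option String × Int :=
  match l with
  | [] => (none, count)
  | c2 :: rest =>
    if count = N then (some (String.ofList [c1, c2]), count)
    else string25Inner c1 rest N (count + 1)

-- outer 'for c1 in sortedS' loop
def string25Outer (outer : List Char) (s : List Char) (N : Int) (count : Int) : Option String :=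
  match outer with
  | [] => none
  | c1 :: rest =>
    match string25Inner c1 s N count with
    | (some r, _) => some r
    | (none, count') => string25Outer rest s N count'

def string25 (S : String) (N : Int) : String :=
  let sortedS := PySem.List.sorted S.toList (fun c => c) false
  match string25Outer sortedS sortedS N 1 with
  | some r => r
  | none => "hoge"

-- ===== PORT B =====
def string25_alt (S : String) (N : Int) : String :=
  let s := PySem.List.sorted S.toList (fun c => c) false
  let L : Int := s.length
  let k := N - 1
  if 0 ≤ k ∧ k < L * L then
    String.ofList [s.getD (PySem.Int.floordiv k L).toNat ' ', s.getD (PySem.Int.mod k L).toNat ' ']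
  else "hoge"

-- ===== PRECONDITION & SPEC =====
def Spec_string25 (S : String) (N : Int) (out : String) : Prop := out = string25_alt S N
instance (S : String) (N : Int) (out : String) : Decidable (Spec_string25 S N out) := by unfold Spec_string25; infer_instance

-- ===== CLAIM (what is proved, stated in full; the proofs are below) =====
def Claim_equal_string25 : Prop := ∀ (S : String) (N : Int), Dom_string25 S N → Spec_string25 S N (string25 S N)

-- ===== LEMMAS AND PROOFS =====

lemma inner_eq (c1 : Char) (l : List Char) (N count : Int) :
    string25Inner c1 l N count =
      if count ≤ N ∧ N < count + l.length then
        (some (String.ofList [c1, l.getD (N - count).toNat ' ']), N)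
      else (none, count + l.length) := by
  induction l generalizing count with
  | nil =>
    simp only [string25Inner, List.length_nil]
    split_ifs with hc
    · exfalso; push_cast at hc; omega
    · simp
  | cons c2 rest ih =>
    simp only [string25Inner, ih]
    by_cases h : count = N
    · subst h
      rw [if_pos rfl]
      split_ifs with hc
      · simp
      · exfalso; apply hc; simp only [List.length_cons]; push_cast; omega
    · rw [if_neg h]
      by_cases h2 : count + 1 ≤ N ∧ N < count + 1 + (rest.length : Int)
      · rw [if_pos h2]
        split_ifs with hc
        · have ht : (N - count).toNat = (N - (count + 1)).toNat + 1 := by omega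
          simp [ht]
        · exfalso; apply hc; simp only [List.length_cons]; push_cast; omega
      · rw [if_neg h2]
        split_ifs with hc
        · exfalso; simp only [List.length_cons] at hc; push_cast at hc h2; omega
        · simp only [List.length_cons, Prod.mk.injEq]
          exact ⟨trivial, by push_cast; ring⟩

lemma outer_eq (outer s : List Char) (N count : Int) :
    string25Outer outer s N count =
      if count ≤ N ∧ N < count + outer.length * s.length then
        some (String.ofList [outer.getD ((N - count).toNat / s.length) ' ',
                             s.getD ((N - count).toNat % s.length) ' '])
      else none := by
  induction outer generalizing count with
  | nil =>
    simp only [string25Outer, List.length_nil]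
    split_ifs with hc
    · exfalso; push_cast at hc; omega
    · rfl
  | cons c1 rest ih =>
    simp only [string25Outer, inner_eq]
    by_cases h : count ≤ N ∧ N < count + (s.length : Int)
    · rw [if_pos h]
      split_ifs with hc
      · have h0 : (N - count).toNat < s.length := by omega
        simp [Nat.div_eq_of_lt h0, Nat.mod_eq_of_lt h0]
      · exfalso; apply hc
        refine ⟨h.1, ?_⟩
        simp only [List.length_cons]; push_cast
        nlinarith [h.2, mul_nonneg (Int.natCast_nonneg rest.length) (Int.natCast_nonneg s.length)]
    · rw [if_neg h]
      show string25Outer rest s N (count + (s.length : Int)) = _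
      rw [ih]
      by_cases h2 : count + (s.length : Int) ≤ N ∧ N < count + (s.length : Int) + (rest.length : Int) * (s.length : Int)
      · rw [if_pos h2]
        split_ifs with hc
        · have hspos : 0 < s.length := by
            rcases Nat.eq_zero_or_pos s.length with h0 | h0
            · exfalso; rw [h0] at h2; push_cast at h2; omega
            · exact h0
          have hsub : (N - count).toNat = (N - (count + (s.length : Int))).toNat + s.length := by
            omega
          have hq : (N - count).toNat / s.length = (N - (count + (s.length : Int))).toNat / s.length + 1 := by
            rw [hsub, Nat.add_div_right _ hspos]
          have hr : (N - count).toNat % s.length = (N - (count + (s.length : Int))).toNat % s.length := by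
            rw [hsub, Nat.add_mod_right]
          rw [hq, hr]
          simp
        · exfalso; apply hc
          refine ⟨by omega, ?_⟩
          simp only [List.length_cons]; push_cast
          nlinarith [h2.2]
      · rw [if_neg h2]
        split_ifs with hc
        · exfalso
          obtain ⟨hc1, hc2⟩ := hc
          have hb : count + (s.length : Int) ≤ N := by omega
          apply h2
          refine ⟨hb, ?_⟩
          simp only [List.length_cons] at hc2; push_cast at hc2
          nlinarith
        · rfl

-- ===== VERDICT (by name: the statement is the Claim_ definition above) =====
theorem string25_spec : Claim_equal_string25 := by
  intro S N _
  unfold Spec_string25 string25 string25_alt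
  dsimp only
  rw [outer_eq]
  set s := PySem.List.sorted S.toList (fun c => c) false with hs
  set M := (s.length : Int) * (s.length : Int) with hM
  by_cases h : 1 ≤ N ∧ N < 1 + M
  · rw [if_pos h, if_pos (show (0:Int) ≤ N - 1 ∧ N - 1 < M by omega)]
    have hL0 : 0 < s.length := by
      rcases Nat.eq_zero_or_pos s.length with h0 | h0
      · exfalso; simp [h0] at hM; omega
      · exact h0
    have hLi : (0 : Int) < (s.length : Int) := by exact_mod_cast hL0
    have hfd : (PySem.Int.floordiv (N - 1) (s.length : Int)).toNat = (N - 1).toNat / s.length := by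
      rw [PySem.Int.floordiv_eq_ediv_of_pos hLi]
      have hN1 : (N - 1 : Int) = ((N - 1).toNat : Int) := by omega
      rw [hN1, ← Int.natCast_div]
      exact Int.toNat_natCast _
    have hmd : (PySem.Int.mod (N - 1) (s.length : Int)).toNat = (N - 1).toNat % s.length := by
      rw [PySem.Int.mod_eq_emod_of_pos hLi]
      have hN1 : (N - 1 : Int) = ((N - 1).toNat : Int) := by omega
      rw [hN1, ← Int.natCast_mod]
      exact Int.toNat_natCast _
    simp [hfd, hmd]
  · rw [if_neg h, if_neg (show ¬((0:Int) ≤ N - 1 ∧ N - 1 < M) by omega)]
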